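-- pv_equiv track=rewrite | github.com/Pranav122002/QnA-Conversational-Chatbot | backend/context.py | identify_context
-- ===== SOURCE A (Python) =====
-- def identify_context(question, dataset):
--     question_keywords = set(question.lower().split())  # Convert question to lowercase and get keywords
--
--     best_context = None
--     highest_overlap = 0
--
--     for context in dataset:
--         context_lower = context.lower()
--         context_keywords = set(context_lower.split())
--
--         # Calculate the overlap between question keywords and context keywords
--         overlap = len(question_keywords.intersection(context_keywords))
--
--         # Update the best context if the overlap is higher
--         if overlap > highest_overlap:
--             best_context = context
--             highest_overlap = overlap
--
--     return best_context
-- ===== SOURCE B (Python) =====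
-- def identify_context(question, dataset):
--     # Per-keyword tallying: precompute each context's word set once, tally an
--     # overlap count per context index for every distinct question keyword,
--     # then take the earliest strict argmax (None if the best count is 0).
--     ctx_sets = [set(c.lower().split()) for c in dataset]
--     counts = [0] * len(dataset)
--     for kw in dict.fromkeys(question.lower().split()):
--         counts = [n + (1 if kw in s else 0) for n, s in zip(counts, ctx_sets)]
--     best_i, highest = None, 0
--     for i, n in enumerate(counts):
--         if n > highest:
--             best_i, highest = i, n
--     return dataset[best_i] if best_i is not None else None
-- ===== Notes on version B (the rewrite author's own statement) =====
-- stated objective: alternative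
-- what changed: Reverses the traversal: instead of intersecting the question's keyword set with each context's set inside one loop, B precomputes all context word sets, tallies a per-context overlap-count array by iterating the distinct question keywords, and finally scans the counts for the earliest strict argmax, looking the context up by index.
import Mathlib
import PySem

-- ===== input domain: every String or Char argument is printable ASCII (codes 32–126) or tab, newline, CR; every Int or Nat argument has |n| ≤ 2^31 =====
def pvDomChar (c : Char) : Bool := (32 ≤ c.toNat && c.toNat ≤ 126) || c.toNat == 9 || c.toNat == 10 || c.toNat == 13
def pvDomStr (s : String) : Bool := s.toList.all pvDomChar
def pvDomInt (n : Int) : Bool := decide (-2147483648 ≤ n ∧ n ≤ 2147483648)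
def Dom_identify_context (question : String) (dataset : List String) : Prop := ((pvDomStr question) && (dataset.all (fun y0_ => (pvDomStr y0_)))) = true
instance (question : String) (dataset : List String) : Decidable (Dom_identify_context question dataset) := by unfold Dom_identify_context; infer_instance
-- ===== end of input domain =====

-- B reverses the traversal (per-keyword tallying into a count array + index argmax)
-- instead of A's per-context set intersection; alternative decomposition, same cost.

-- ===== PORT A =====
def identify_context (question : String) (dataset : List String) : Option String :=
  let question_keywords : PySem.Set String :=
    PySem.Set.ofList (PySem.Str.split₀ (PySem.Str.lower question))
  (dataset.foldl (fun (st : Option String × Int) context =>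
      let context_keywords : PySem.Set String :=
        PySem.Set.ofList (PySem.Str.split₀ (PySem.Str.lower context))
      let overlap : Int := PySem.Set.len (PySem.Set.inter question_keywords context_keywords)
      if overlap > st.2 then (some context, overlap) else st)
    (none, 0)).1

-- ===== PORT B =====
def identify_context_alt (question : String) (dataset : List String) : Option String :=
  let ctxSets : List (PySem.Set String) :=
    dataset.map (fun c => PySem.Set.ofList (PySem.Str.split₀ (PySem.Str.lower c)))
  let counts : List Int :=
    (PySem.List.dedup (PySem.Str.split₀ (PySem.Str.lower question))).foldl
      (fun counts kw =>
        (counts.zip ctxSets).map (fun p => p.1 + (if PySem.Set.contains p.2 kw then 1 else 0)))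
      (List.replicate dataset.length 0)
  let st := (PySem.List.enumerate counts).foldl
      (fun (st : Option Int × Int) p => if p.2 > st.2 then (some p.1, p.2) else st) (none, 0)
  match st.1 with
  | none => none
  | some i => PySem.List.pyGet? dataset i

-- ===== PRECONDITION & SPEC =====
def Spec_identify_context (question : String) (dataset : List String) (out : Option String) : Prop := out = identify_context_alt question dataset
instance (question : String) (dataset : List String) (out : Option String) : Decidable (Spec_identify_context question dataset out) := by unfold Spec_identify_context; infer_instance

-- ===== CLAIM (what is proved, stated in full; the proofs are below) =====
def Claim_equal_identify_context : Prop := ∀ (question : String) (dataset : List String), Dom_identify_context question dataset → Spec_identify_context question dataset (identify_context question dataset)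

-- ===== LEMMAS AND PROOFS =====

-- counts after folding all keywords = per-context overlap lengths
theorem pv_zip_map (f : Int × PySem.Set String → Int) (xs : List Int) (ys : List (PySem.Set String)) :
    (xs.zip ys).map f = List.zipWith (fun a b => f (a, b)) xs ys := by
  induction xs generalizing ys with
  | nil => simp
  | cons x xs ih => cases ys <;> simp [ih]

theorem pv_zipWith_id (base : List Int) :
    ∀ (sets : List (PySem.Set String)), base.length = sets.length →
    List.zipWith (fun b (_ : PySem.Set String) => b) base sets = base := by
  induction base with
  | nil => intro sets _; simp
  | cons b bs ih => intro sets h; cases sets with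
    | nil => simp at h
    | cons s ss => simpa using ih ss (by simpa using h)

theorem pv_zipWith_comp (f g : Int → PySem.Set String → Int) (base : List Int) :
    ∀ (sets : List (PySem.Set String)),
    List.zipWith g (List.zipWith f base sets) sets
      = List.zipWith (fun b s => g (f b s) s) base sets := by
  induction base with
  | nil => intro sets; simp
  | cons b bs ih => intro sets; cases sets <;> simp [ih]

theorem pv_zipWith_ext (f g : Int → PySem.Set String → Int) (hfg : ∀ a b, f a b = g a b)
    (base : List Int) : ∀ (sets : List (PySem.Set String)),
    List.zipWith f base sets = List.zipWith g base sets := by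
  induction base with
  | nil => intro sets; simp
  | cons b bs ih => intro sets; cases sets <;> simp [ih, hfg]

theorem pv_counts_inv (l : List String) :
    ∀ (sets : List (PySem.Set String)) (base : List Int), base.length = sets.length →
    l.foldl (fun counts kw =>
        (counts.zip sets).map (fun p => p.1 + (if PySem.Set.contains p.2 kw then 1 else 0)))
      base
    = List.zipWith (fun b s => b + (((l.filter (fun kw => PySem.Set.contains s kw)).length : Int))) base sets := by
  induction l with
  | nil =>
    intro sets base h
    simp only [List.foldl_nil, List.filter_nil, List.length_nil, Int.natCast_zero, add_zero]
    exact (pv_zipWith_id base sets h).symm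
  | cons kw l ih =>
    intro sets base h
    simp only [List.foldl_cons]
    rw [pv_zip_map, ih sets _ (by simp [h]), pv_zipWith_comp]
    apply pv_zipWith_ext
    intro a s
    by_cases hc : kw ∈ s <;> simp [hc, List.filter_cons] <;> push_cast <;> ring

theorem pv_zipWith_replicate (g : Int → PySem.Set String → Int) (ys : List (PySem.Set String)) :
    List.zipWith g (List.replicate ys.length 0) ys = ys.map (g 0) := by
  induction ys with
  | nil => simp
  | cons y ys ih => simp [List.replicate_succ, ih]

-- argmax over enumerated counts vs A's fold carrying the context itself
theorem pv_argmax (f : String → Int) (full : List String) :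
    ∀ (ds' pre : List String), full = pre ++ ds' →
    ∀ (bO : Option String) (bI : Option Int) (h : Int),
      bO = bI.bind (PySem.List.pyGet? full) →
    (ds'.foldl (fun (st : Option String × Int) c =>
        if f c > st.2 then (some c, f c) else st) (bO, h)).1
      = ((PySem.List.enumerate (ds'.map f) pre.length).foldl
          (fun (st : Option Int × Int) p => if p.2 > st.2 then (some p.1, p.2) else st)
          (bI, h)).1.bind (PySem.List.pyGet? full)
    ∧ (ds'.foldl (fun (st : Option String × Int) c =>
        if f c > st.2 then (some c, f c) else st) (bO, h)).2
      = ((PySem.List.enumerate (ds'.map f) pre.length).foldl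
          (fun (st : Option Int × Int) p => if p.2 > st.2 then (some p.1, p.2) else st)
          (bI, h)).2 := by
  intro ds'
  induction ds' with
  | nil => intro pre _ bO bI h hrel; simp [hrel]
  | cons c rest ih =>
    intro pre hfull bO bI h hrel
    simp only [List.map_cons, PySem.List.enumerate_cons, List.foldl_cons]
    have hpre : ((pre ++ [c]).length : Int) = (pre.length : Int) + 1 := by simp
    by_cases hgt : f c > h
    · have hget : PySem.List.pyGet? full (pre.length : Int) = some c := by
        rw [PySem.List.pyGet?_natCast, hfull]
        simp
      have := ih (pre ++ [c]) (by simp [hfull]) (some c) (some (pre.length : Int)) (f c)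
        (by simp [hget])
      rw [hpre] at this
      simpa [hgt] using this
    · have := ih (pre ++ [c]) (by simp [hfull]) bO bI h hrel
      rw [hpre] at this
      simpa [hgt] using this

set_option maxHeartbeats 1000000 in
theorem pv_counts_eq_map (question : String) (dataset : List String) :
    (PySem.List.dedup (PySem.Str.split₀ (PySem.Str.lower question))).foldl
      (fun counts kw =>
        (counts.zip (dataset.map (fun c => PySem.Set.ofList (PySem.Str.split₀ (PySem.Str.lower c))))).map
          (fun p => p.1 + (if PySem.Set.contains p.2 kw then 1 else 0)))
      (List.replicate dataset.length 0)
    = dataset.map (fun c =>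
        PySem.Set.len (PySem.Set.inter
          (PySem.Set.ofList (PySem.Str.split₀ (PySem.Str.lower question)))
          (PySem.Set.ofList (PySem.Str.split₀ (PySem.Str.lower c))))) := by
  rw [pv_counts_inv _ _ _ (by simp)]
  have h := pv_zipWith_replicate
    (fun b s => b + ((((PySem.List.dedup (PySem.Str.split₀ (PySem.Str.lower question))).filter
      (fun kw => PySem.Set.contains s kw)).length : Int)))
    (dataset.map (fun c => PySem.Set.ofList (PySem.Str.split₀ (PySem.Str.lower c))))
  simp only [List.length_map] at h
  rw [h, List.map_map]
  apply List.map_congr_left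
  intro c _
  simp [PySem.Set.len, PySem.Set.inter, PySem.List.dedup_eq_ofList]

theorem pv_main (question : String) (dataset : List String) :
    identify_context question dataset = identify_context_alt question dataset := by
  unfold identify_context identify_context_alt
  simp only []
  rw [pv_counts_eq_map]
  have h := pv_argmax
    (fun c => PySem.Set.len (PySem.Set.inter
      (PySem.Set.ofList (PySem.Str.split₀ (PySem.Str.lower question)))
      (PySem.Set.ofList (PySem.Str.split₀ (PySem.Str.lower c)))))
    dataset dataset [] (by simp) none none 0 (by simp)
  simp only [List.length_nil, Int.natCast_zero] at h
  rw [h.1]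
  cases ((PySem.List.enumerate (dataset.map _) 0).foldl
      (fun (st : Option Int × Int) p => if p.2 > st.2 then (some p.1, p.2) else st) (none, 0)).1 with
  | none => rfl
  | some i => rfl

-- ===== VERDICT (by name: the statement is the Claim_ definition above) =====
theorem identify_context_spec : Claim_equal_identify_context := by
  intro question dataset _
  exact pv_main question dataset
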